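-- pv_equiv track=rewrite | github.com/benlodz/advent-of-code2024 | python/solutions/day22.py | get_secret_number_sum
-- ===== SOURCE A (Python) =====
-- from typing import List, Tuple, Set, Dict, Deque, DefaultDict, Union
-- from math import floor
--
-- def mix_and_prune(a: int, b: int) -> int:
--     a ^= b
--     return a % 16777216
--
-- def get_secret_number_sum(secret_numbers: List[int], cnt: int) -> int:
--
--     secret_number_sum: int = 0
--     for secret_number in secret_numbers:
--         for _ in range(cnt):
--             # first step
--             secret_number = mix_and_prune(secret_number, secret_number * 64)
--             # second step
--             secret_number = mix_and_prune(secret_number, floor(secret_number / 32))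
--             # third step
--             secret_number = mix_and_prune(secret_number, secret_number * 2048)
--         secret_number_sum += secret_number
--     return secret_number_sum
-- ===== SOURCE B (Python) =====
-- M24 = 0xFFFFFF
--
--
-- def _step(v):
--     # one PRNG round on a 24-bit state (GF(2)-linear: xors of shifted copies)
--     v = (v ^ (v << 6)) & M24
--     v = (v ^ (v >> 5)) & M24
--     v = (v ^ (v << 11)) & M24
--     return v
--
--
-- def _apply(cols, v):
--     # apply the linear map whose column images are cols to the bit-vector v
--     r = 0
--     for c in cols:
--         if v & 1:
--             r ^= c
--         v >>= 1
--     return r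
--
--
-- def _compose(f, g):
--     # column representation of f . g
--     return [_apply(f, c) for c in g]
--
--
-- def get_secret_number_sum(secret_numbers, cnt):
--     if cnt <= 0:
--         return sum(secret_numbers)
--     # the round is GF(2)-linear on 24-bit states: build its matrix (columns =
--     # images of the basis vectors) and raise it to the cnt-th power by squaring
--     mat = [_step(1 << j) for j in range(24)]
--     acc = [1 << j for j in range(24)]  # identity
--     e = cnt
--     while e:
--         if e & 1:
--             acc = _compose(mat, acc)
--         mat = _compose(mat, mat)
--         e >>= 1
--     return sum(_apply(acc, s % 16777216) for s in secret_numbers)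
-- ===== Notes on version B (the rewrite author's own statement) =====
-- stated objective: faster
-- what changed: B exploits that one PRNG round is GF(2)-linear on the 24-bit state: it builds the 24x24 binary step matrix (stored as 24 column bitmasks), raises it to the cnt-th power by repeated squaring, and applies the resulting single linear map to each (pruned) input, instead of A's per-number loop of cnt rounds.
import Mathlib
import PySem

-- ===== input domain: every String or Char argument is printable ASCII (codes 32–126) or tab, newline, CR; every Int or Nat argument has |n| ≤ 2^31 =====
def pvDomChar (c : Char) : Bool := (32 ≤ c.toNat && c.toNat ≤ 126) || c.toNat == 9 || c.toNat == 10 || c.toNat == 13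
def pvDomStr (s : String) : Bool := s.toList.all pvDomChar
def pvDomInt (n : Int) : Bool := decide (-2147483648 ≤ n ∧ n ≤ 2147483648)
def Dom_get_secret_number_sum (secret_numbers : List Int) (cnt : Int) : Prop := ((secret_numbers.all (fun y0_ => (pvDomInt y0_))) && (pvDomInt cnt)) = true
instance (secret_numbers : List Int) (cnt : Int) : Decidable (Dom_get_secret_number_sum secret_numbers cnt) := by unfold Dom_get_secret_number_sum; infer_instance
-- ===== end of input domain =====

-- B exploits that one PRNG round is GF(2)-linear on the 24-bit state: it builds the 24x24 binary
-- step matrix (24 column bitmasks), raises it to the cnt-th power by repeated squaring, and applies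
-- the single resulting linear map to each pruned input ("faster": a timing run measures it).


-- ===== PORT A =====
def mix_and_prune (a b : Int) : Int :=
  PySem.Int.mod (PySem.Int.bxor a b) 16777216

-- floor(secret_number / 32): at that call site secret_number is a result of mix_and_prune, hence in
-- [0, 2^24), so Python's float division is exact there and floor(s / 32) = s // 32 (= floordiv).
def get_secret_number_sum (secret_numbers : List Int) (cnt : Int) : Int :=
  secret_numbers.foldl (fun secret_number_sum secret_number =>
    secret_number_sum +
      (PySem.List.pyRange 0 cnt 1).foldl (fun s _ =>
        let s := mix_and_prune s (s * 64)
        let s := mix_and_prune s (PySem.Int.floordiv s 32)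
        mix_and_prune s (s * 2048)) secret_number) 0

-- ===== PORT B =====
def pvM24 : Int := 16777215

def pvStep (v : Int) : Int :=
  let v := PySem.Int.band (PySem.Int.bxor v (v <<< (6 : Nat))) pvM24
  let v := PySem.Int.band (PySem.Int.bxor v (v >>> (5 : Nat))) pvM24
  PySem.Int.band (PySem.Int.bxor v (v <<< (11 : Nat))) pvM24

def pvApply (cols : List Int) (v : Int) : Int :=
  (cols.foldl (fun (rv : Int × Int) c =>
      (if PySem.Int.band rv.2 1 ≠ 0 then PySem.Int.bxor rv.1 c else rv.1, rv.2 >>> (1 : Nat)))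
    (0, v)).1

def pvCompose (f g : List Int) : List Int := g.map (fun c => pvApply f c)

-- Python's 'while e: ... e >>= 1' on a positive int, as structural recursion on e : Nat
def pvPowLoop (mat acc : List Int) (e : Nat) : List Int :=
  match e with
  | 0 => acc
  | e' + 1 =>
    pvPowLoop (pvCompose mat mat)
      (if (e' + 1) % 2 = 1 then pvCompose mat acc else acc) ((e' + 1) / 2)
termination_by e
decreasing_by omega

def get_secret_number_sum_alt (secret_numbers : List Int) (cnt : Int) : Int :=
  if cnt ≤ 0 then secret_numbers.sum
  else
    let mat := (List.range 24).map (fun j : Nat => pvStep ((1 : Int) <<< j))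
    let acc := (List.range 24).map (fun j : Nat => ((1 : Int) <<< j))
    let m := pvPowLoop mat acc cnt.toNat
    (secret_numbers.map (fun s => pvApply m (PySem.Int.mod s 16777216))).sum

-- ===== PRECONDITION & SPEC =====
def Spec_get_secret_number_sum (secret_numbers : List Int) (cnt : Int) (out : Int) : Prop := out = get_secret_number_sum_alt secret_numbers cnt
instance (secret_numbers : List Int) (cnt : Int) (out : Int) : Decidable (Spec_get_secret_number_sum secret_numbers cnt out) := by unfold Spec_get_secret_number_sum; infer_instance

-- ===== CLAIM (what is proved, stated in full; the proofs are below) =====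
def Claim_equal_get_secret_number_sum : Prop := ∀ (secret_numbers : List Int) (cnt : Int), Dom_get_secret_number_sum secret_numbers cnt → Spec_get_secret_number_sum secret_numbers cnt (get_secret_number_sum secret_numbers cnt)

-- ===== LEMMAS AND PROOFS =====

-- Nat-level model of one PRNG round (three linear stages on 24-bit states)
def stA (v : Nat) : Nat := (v ^^^ (v <<< 6)) % 2 ^ 24
def stB (v : Nat) : Nat := (v ^^^ (v >>> 5)) % 2 ^ 24
def stC (v : Nat) : Nat := (v ^^^ (v <<< 11)) % 2 ^ 24
def sN (v : Nat) : Nat := stC (stB (stA v))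

-- the low 24 bits of an Int, as Python's s % 16777216
def loN (s : Int) : Nat := (s % 16777216).toNat

-- Nat-level mirror of pvApply / pvCompose / pvPowLoop
def applyN (cols : List Nat) (v : Nat) : Nat :=
  (cols.foldl (fun (rv : Nat × Nat) c =>
      (if rv.2 % 2 = 1 then rv.1 ^^^ c else rv.1, rv.2 / 2)) (0, v)).1

def composeN (f g : List Nat) : List Nat := g.map (fun c => applyN f c)

def powLoopN (mat acc : List Nat) (e : Nat) : List Nat :=
  match e with
  | 0 => acc
  | e' + 1 =>
    powLoopN (composeN mat mat)
      (if (e' + 1) % 2 = 1 then composeN mat acc else acc) ((e' + 1) / 2)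
termination_by e
decreasing_by omega

def matOf (h : Nat → Nat) : List Nat := (List.range 24).map (fun j => h (2 ^ j))

def Lin (h : Nat → Nat) : Prop :=
  (∀ x y, h (x ^^^ y) = h x ^^^ h y) ∧ h 0 = 0 ∧ ∀ v, h v < 2 ^ 24

-- ---- small bit facts ----
lemma mask_xor (n : Nat) : ∀ a, a < 2 ^ n → (2 ^ n - 1) ^^^ a = 2 ^ n - 1 - a := by
  induction n with
  | zero =>
    intro a h
    have ha : a = 0 := by simpa using Nat.lt_one_iff.mp (by simpa using h)
    subst ha; decide
  | succ n ih =>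
    intro a h
    have hp : 2 ^ (n + 1) = 2 * 2 ^ n := by rw [pow_succ]; ring
    have hp1 : 1 ≤ 2 ^ n := Nat.one_le_two_pow
    have hx := Nat.div_add_mod ((2 ^ (n + 1) - 1) ^^^ a) 2
    have hd : ((2 ^ (n + 1) - 1) ^^^ a) / 2 = (2 ^ n - 1) ^^^ (a / 2) := by
      rw [Nat.xor_div_two]; congr 1; omega
    have hda : a / 2 < 2 ^ n := by omega
    have hm : ((2 ^ (n + 1) - 1) ^^^ a) % 2 ^ 1 = (2 ^ (n + 1) - 1) % 2 ^ 1 ^^^ a % 2 ^ 1 :=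
      Nat.xor_mod_two_pow
    rw [pow_one] at hm
    have h1 : (2 ^ (n + 1) - 1) % 2 = 1 := by omega
    rw [hd, ih _ hda] at hx
    rw [h1] at hm
    rcases Nat.mod_two_eq_zero_or_one a with h2 | h2
    · rw [h2, show (1 : Nat) ^^^ 0 = 1 from rfl] at hm
      omega
    · rw [h2, show (1 : Nat) ^^^ 1 = 0 from rfl] at hm
      omega

lemma xor_two_mul (q r : Nat) (hr : r < 2) : (2 * q) ^^^ r = 2 * q + r := by
  have hd : ((2 * q) ^^^ r) / 2 = q := by
    rw [Nat.xor_div_two]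
    have h1 : 2 * q / 2 = q := by omega
    have h2 : r / 2 = 0 := by omega
    rw [h1, h2, Nat.xor_zero]
  have hm : ((2 * q) ^^^ r) % 2 ^ 1 = (2 * q) % 2 ^ 1 ^^^ r % 2 ^ 1 := Nat.xor_mod_two_pow
  rw [pow_one] at hm
  have h3 : 2 * q % 2 = 0 := by omega
  have h4 : r % 2 = r := by omega
  rw [h3, h4, Nat.zero_xor] at hm
  have := Nat.div_add_mod ((2 * q) ^^^ r) 2
  omega

lemma mask_xor24 (m : Nat) (h : m < 16777216) : 16777215 ^^^ m = 16777215 - m := by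
  have h2 := mask_xor 24 m (by norm_num; omega)
  norm_num at h2
  omega

lemma xorM (x y : Nat) : (x ^^^ y) % 16777216 = x % 16777216 ^^^ y % 16777216 := by
  have h : (x ^^^ y) % 2 ^ 24 = x % 2 ^ 24 ^^^ y % 2 ^ 24 := Nat.xor_mod_two_pow
  norm_num at h
  exact h

-- ---- loN and the Python-exact bxor/mod ----
lemma loN_lt (s : Int) : loN s < 16777216 := by unfold loN; omega

lemma loN_of_nonneg (s : Int) (h : 0 ≤ s) : loN s = s.toNat % 16777216 := by unfold loN; omega

lemma loN_of_neg (s : Int) (h : s < 0) :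
    loN s = 16777215 ^^^ ((-s - 1).toNat % 16777216) := by
  rw [mask_xor24 _ (Nat.mod_lt _ (by norm_num))]; unfold loN; omega

lemma loN_natCast' (u : Nat) : loN (u : Int) = u % 16777216 := by unfold loN; omega

lemma loN_natCast (u : Nat) (h : u < 16777216) : loN (u : Int) = u := by unfold loN; omega

lemma modM_cast (x : Nat) : PySem.Int.mod (x : Int) 16777216 = ((x % 16777216 : Nat) : Int) := by
  rw [PySem.Int.mod_eq_emod_of_pos (by norm_num)]; omega

lemma modM_neg_cast (x : Nat) :
    PySem.Int.mod (-(x : Int) - 1) 16777216 = ((16777215 ^^^ x % 16777216 : Nat) : Int) := by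
  rw [PySem.Int.mod_eq_emod_of_pos (by norm_num),
      mask_xor24 _ (Nat.mod_lt _ (by norm_num))]
  omega

lemma bxor_mod24 (a b : Int) :
    PySem.Int.mod (PySem.Int.bxor a b) 16777216 = ((loN a ^^^ loN b : Nat) : Int) := by
  by_cases ha : 0 ≤ a <;> by_cases hb : 0 ≤ b
  · rw [show PySem.Int.bxor a b = ((a.toNat ^^^ b.toNat : Nat) : Int) from
      PySem.Int.bxor_of_nonneg ha hb]
    rw [modM_cast, xorM, loN_of_nonneg a ha, loN_of_nonneg b hb]
  · have hb' : b < 0 := by omega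
    rw [show PySem.Int.bxor a b = -((a.toNat ^^^ (-b - 1).toNat : Nat) : Int) - 1 by
      simp [PySem.Int.bxor, ha, not_le.mpr hb']]
    rw [modM_neg_cast, xorM, loN_of_nonneg a ha, loN_of_neg b hb']
    congr 1
    simp [Nat.xor_left_comm]
  · have ha' : a < 0 := by omega
    rw [show PySem.Int.bxor a b = -(((-a - 1).toNat ^^^ b.toNat : Nat) : Int) - 1 by
      simp [PySem.Int.bxor, not_le.mpr ha', hb]]
    rw [modM_neg_cast, xorM, loN_of_neg a ha', loN_of_nonneg b hb]
    congr 1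
    simp [Nat.xor_comm, Nat.xor_left_comm]
  · have ha' : a < 0 := by omega
    have hb' : b < 0 := by omega
    rw [show PySem.Int.bxor a b = (((-a - 1).toNat ^^^ (-b - 1).toNat : Nat) : Int) by
      simp [PySem.Int.bxor, not_le.mpr ha', not_le.mpr hb']]
    rw [modM_cast, xorM, loN_of_neg a ha', loN_of_neg b hb']
    congr 1
    simp [Nat.xor_comm, Nat.xor_left_comm]

-- ---- the A round equals sN on the low bits ----
lemma stA_lt (v : Nat) : stA v < 2 ^ 24 := Nat.mod_lt _ (by norm_num)
lemma stB_lt (v : Nat) : stB v < 2 ^ 24 := Nat.mod_lt _ (by norm_num)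
lemma sN_lt (v : Nat) : sN v < 2 ^ 24 := Nat.mod_lt _ (by norm_num)

lemma mix1_eq (s : Int) : mix_and_prune s (s * 64) = ((stA (loN s) : Nat) : Int) := by
  unfold mix_and_prune
  rw [bxor_mod24]
  have h2 : s % 16777216 = ((loN s : Nat) : Int) := by unfold loN; omega
  have h64 : loN (s * 64) = ((loN s) <<< 6) % 16777216 := by
    rw [Nat.shiftLeft_eq]
    norm_num
    unfold loN
    omega
  rw [h64]
  congr 1
  unfold stA
  rw [show (2 : Nat) ^ 24 = 16777216 from by norm_num, xorM,
    Nat.mod_eq_of_lt (loN_lt s)]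

lemma mix2_eq (w : Nat) (h : w < 16777216) :
    mix_and_prune (w : Int) (PySem.Int.floordiv (w : Int) 32) = ((stB w : Nat) : Int) := by
  unfold mix_and_prune
  have hf : PySem.Int.floordiv (w : Int) 32 = ((w / 32 : Nat) : Int) := by
    rw [PySem.Int.floordiv_eq_ediv_of_pos (by norm_num)]; omega
  rw [hf, bxor_mod24, loN_natCast w h, loN_natCast (w / 32) (by omega)]
  congr 1
  unfold stB
  have h24 : (2 : Nat) ^ 24 = 16777216 := by norm_num
  have hlt : w ^^^ w / 32 < 16777216 := by
    have := Nat.xor_lt_two_pow (x := w) (y := w / 32) (n := 24) (by omega) (by omega)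
    omega
  rw [Nat.shiftRight_eq_div_pow, show (2 : Nat) ^ 5 = 32 from by norm_num, h24,
    Nat.mod_eq_of_lt hlt]

lemma mix3_eq (w : Nat) (h : w < 16777216) :
    mix_and_prune (w : Int) ((w : Int) * 2048) = ((stC w : Nat) : Int) := by
  unfold mix_and_prune
  have hm : (w : Int) * 2048 = ((w * 2048 : Nat) : Int) := by push_cast; ring
  rw [hm, bxor_mod24, loN_natCast w h, loN_natCast' (w * 2048)]
  congr 1
  unfold stC
  rw [Nat.shiftLeft_eq, show (2 : Nat) ^ 11 = 2048 from by norm_num,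
    show (2 : Nat) ^ 24 = 16777216 from by norm_num, xorM, Nat.mod_eq_of_lt h]

lemma pvRound_eq (s : Int) :
    (let s1 := mix_and_prune s (s * 64);
     let s2 := mix_and_prune s1 (PySem.Int.floordiv s1 32);
     mix_and_prune s2 (s2 * 2048)) = ((sN (loN s) : Nat) : Int) := by
  show mix_and_prune _ _ = _
  rw [mix1_eq, mix2_eq _ (by have := stA_lt (loN s); omega),
      mix3_eq _ (by have := stB_lt (stA (loN s)); omega)]
  rfl

-- ---- linearity of the round ----
lemma stA_lin (x y : Nat) : stA (x ^^^ y) = stA x ^^^ stA y := by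
  unfold stA
  rw [Nat.shiftLeft_xor_distrib, ← Nat.xor_mod_two_pow]
  congr 1
  simp [Nat.xor_assoc, Nat.xor_comm, Nat.xor_left_comm]

lemma stB_lin (x y : Nat) : stB (x ^^^ y) = stB x ^^^ stB y := by
  unfold stB
  rw [Nat.shiftRight_xor_distrib, ← Nat.xor_mod_two_pow]
  congr 1
  simp [Nat.xor_assoc, Nat.xor_comm, Nat.xor_left_comm]

lemma stC_lin (x y : Nat) : stC (x ^^^ y) = stC x ^^^ stC y := by
  unfold stC
  rw [Nat.shiftLeft_xor_distrib, ← Nat.xor_mod_two_pow]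
  congr 1
  simp [Nat.xor_assoc, Nat.xor_comm, Nat.xor_left_comm]

lemma st_linear (x y : Nat) : sN (x ^^^ y) = sN x ^^^ sN y := by
  unfold sN
  rw [stA_lin, stB_lin, stC_lin]

lemma lin_sN : Lin sN := ⟨st_linear, by decide, sN_lt⟩

lemma lin_id24 : Lin (fun v => v % 2 ^ 24) := by
  refine ⟨?_, by norm_num, fun v => Nat.mod_lt _ (by norm_num)⟩
  intro x y
  exact Nat.xor_mod_two_pow

lemma lin_comp {f g : Nat → Nat} (hf : Lin f) (hg : Lin g) : Lin (fun v => f (g v)) :=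
  ⟨fun x y => by show f (g (x ^^^ y)) = f (g x) ^^^ f (g y); rw [hg.1, hf.1],
   by show f (g 0) = 0; rw [hg.2.1, hf.2.1],
   fun v => hf.2.2 _⟩

lemma lin_iter {f : Nat → Nat} (hf : Lin f) : ∀ n, Lin (fun v => f^[n + 1] v) := by
  intro n
  induction n with
  | zero =>
    have h1 : (fun v => f^[0 + 1] v) = f := by funext v; simp
    rw [h1]; exact hf
  | succ n ih =>
    have ih1 : ∀ x y, f^[n + 1] (x ^^^ y) = f^[n + 1] x ^^^ f^[n + 1] y := ih.1
    have ih0 : f^[n + 1] 0 = 0 := ih.2.1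
    refine ⟨fun x y => ?_, ?_, fun v => ?_⟩
    · show f^[n + 1 + 1] (x ^^^ y) = f^[n + 1 + 1] x ^^^ f^[n + 1 + 1] y
      rw [Function.iterate_succ_apply' f (n + 1), Function.iterate_succ_apply' f (n + 1),
        Function.iterate_succ_apply' f (n + 1), ih1, hf.1]
    · show f^[n + 1 + 1] 0 = 0
      rw [Function.iterate_succ_apply' f (n + 1), ih0, hf.2.1]
    · show f^[n + 1 + 1] v < 2 ^ 24
      rw [Function.iterate_succ_apply' f (n + 1)]
      exact hf.2.2 _

-- ---- applyN computes the represented linear map ----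
lemma applyN_acc : ∀ (cols : List Nat) (r v : Nat),
    (cols.foldl (fun (rv : Nat × Nat) c =>
        (if rv.2 % 2 = 1 then rv.1 ^^^ c else rv.1, rv.2 / 2)) (r, v)).1
      = r ^^^ (cols.foldl (fun (rv : Nat × Nat) c =>
        (if rv.2 % 2 = 1 then rv.1 ^^^ c else rv.1, rv.2 / 2)) (0, v)).1 := by
  intro cols
  induction cols with
  | nil => intro r v; simp
  | cons c cs ih =>
    intro r v
    simp only [List.foldl_cons]
    rw [ih, ih (if v % 2 = 1 then 0 ^^^ c else 0)]
    split_ifs with h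
    · rw [Nat.zero_xor, Nat.xor_assoc]
    · rw [Nat.zero_xor]

lemma applyN_cons (c : Nat) (cs : List Nat) (v : Nat) :
    applyN (c :: cs) v = (if v % 2 = 1 then c else 0) ^^^ applyN cs (v / 2) := by
  show (cs.foldl _ (if v % 2 = 1 then 0 ^^^ c else 0, v / 2)).1 = _
  rw [applyN_acc]
  split_ifs with h
  · rw [Nat.zero_xor]; rfl
  · simp only [Nat.zero_xor]; rfl

lemma two_mul_xor (a b : Nat) : 2 * (a ^^^ b) = (2 * a) ^^^ (2 * b) := by
  have h : (a ^^^ b) <<< 1 = a <<< 1 ^^^ b <<< 1 := Nat.shiftLeft_xor_distrib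
  rw [Nat.shiftLeft_eq, Nat.shiftLeft_eq, Nat.shiftLeft_eq, pow_one] at h
  rw [mul_comm 2 (a ^^^ b), mul_comm 2 a, mul_comm 2 b]
  exact h

lemma applyN_basis : ∀ (n : Nat) (h : Nat → Nat),
    (∀ x y, h (x ^^^ y) = h x ^^^ h y) → h 0 = 0 →
    ∀ v, applyN ((List.range n).map (fun j => h (2 ^ j))) v = h (v % 2 ^ n) := by
  intro n
  induction n with
  | zero => intro h _ h0 v; simp [applyN, Nat.mod_one, h0]
  | succ n ih =>
    intro h hlin h0 v
    rw [List.range_succ_eq_map]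
    simp only [List.map_cons, List.map_map]
    have hcols : (List.range n).map ((fun j => h (2 ^ j)) ∘ Nat.succ)
        = (List.range n).map (fun j => (fun x => h (2 * x)) (2 ^ j)) := by
      refine List.map_congr_left ?_
      intro j _
      simp only [Function.comp]
      congr 1
      rw [pow_succ]
      ring
    rw [hcols, applyN_cons]
    have hlin' : ∀ x y, (fun x => h (2 * x)) (x ^^^ y)
        = (fun x => h (2 * x)) x ^^^ (fun x => h (2 * x)) y := by
      intro x y
      show h (2 * (x ^^^ y)) = h (2 * x) ^^^ h (2 * y)
      rw [two_mul_xor, hlin]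
    have h0' : (fun x => h (2 * x)) 0 = 0 := by simp [h0]
    rw [ih (fun x => h (2 * x)) hlin' h0']
    show (if v % 2 = 1 then h (2 ^ 0) else 0) ^^^ h (2 * (v / 2 % 2 ^ n)) = h (v % 2 ^ (n + 1))
    have hif : (if v % 2 = 1 then h (2 ^ 0) else 0) = h (v % 2) := by
      rcases Nat.mod_two_eq_zero_or_one v with h2 | h2 <;> simp [h2, h0]
    rw [hif, ← hlin]
    congr 1
    rw [Nat.xor_comm, xor_two_mul _ _ (by omega)]
    have hmm : v % (2 ^ n * 2) = v % 2 + 2 * (v / 2 % 2 ^ n) := by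
      rw [mul_comm]; exact Nat.mod_mul
    rw [pow_succ]
    omega

lemma applyN_matOf {h : Nat → Nat} (hh : Lin h) (v : Nat) (hv : v < 2 ^ 24) :
    applyN (matOf h) v = h v := by
  unfold matOf
  rw [applyN_basis 24 h hh.1 hh.2.1, Nat.mod_eq_of_lt hv]

lemma composeN_matOf {f g : Nat → Nat} (hf : Lin f) (hg : Lin g) :
    composeN (matOf f) (matOf g) = matOf (fun v => f (g v)) := by
  unfold composeN matOf
  rw [List.map_map]
  refine List.map_congr_left ?_
  intro j _
  simp only [Function.comp]
  exact applyN_matOf hf _ (hg.2.2 _)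

-- ---- the squaring loop computes the iterate ----
lemma iter_sq {f : Nat → Nat} : ∀ (k : Nat) (x : Nat), (fun v => f (f v))^[k] x = f^[2 * k] x := by
  intro k
  induction k with
  | zero => intro x; rfl
  | succ k ih =>
    intro x
    rw [Function.iterate_succ_apply, ih]
    rw [show 2 * (k + 1) = 2 * k + 1 + 1 by ring]
    rw [Function.iterate_succ_apply, Function.iterate_succ_apply]

lemma powLoopN_sem : ∀ (e : Nat) (f g : Nat → Nat), Lin f → Lin g →
    powLoopN (matOf f) (matOf g) e = matOf (fun v => f^[e] (g v)) := by
  intro e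
  induction e using Nat.strong_induction_on with
  | _ e ih =>
    intro f g hf hg
    match e with
    | 0 =>
      rw [powLoopN]
      have hg0 : (fun v => f^[0] (g v)) = g := by funext v; rfl
      rw [hg0]
    | e' + 1 =>
      have hff : Lin (fun v => f (f v)) := lin_comp hf hf
      rw [powLoopN, composeN_matOf hf hf]
      by_cases hp : (e' + 1) % 2 = 1
      · rw [if_pos hp, composeN_matOf hf hg,
          ih ((e' + 1) / 2) (by omega) _ _ hff (lin_comp hf hg)]
        congr 1
        funext v
        show (fun v => f (f v))^[(e' + 1) / 2] (f (g v)) = f^[e' + 1] (g v)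
        rw [iter_sq]
        conv_rhs => rw [show (e' + 1 : Nat) = 2 * ((e' + 1) / 2) + 1 by omega,
          Function.iterate_succ_apply]
      · rw [if_neg hp, ih ((e' + 1) / 2) (by omega) _ _ hff hg]
        congr 1
        funext v
        show (fun v => f (f v))^[(e' + 1) / 2] (g v) = f^[e' + 1] (g v)
        rw [iter_sq]
        conv_rhs => rw [show (e' + 1 : Nat) = 2 * ((e' + 1) / 2) by omega]

-- ---- Int <-> Nat bridges for the B port ----
lemma cast_shl (u k : Nat) : ((u : Nat) : Int) <<< k = ((u <<< k : Nat) : Int) := rfl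

lemma cast_shr (u k : Nat) : ((u : Nat) : Int) >>> k = ((u >>> k : Nat) : Int) := rfl

lemma band_mask_cast (x : Nat) :
    PySem.Int.band ((x : Nat) : Int) pvM24 = ((x % 16777216 : Nat) : Int) := by
  rw [show pvM24 = ((16777215 : Nat) : Int) by norm_num [pvM24], PySem.Int.band_natCast]
  congr 1
  have h := Nat.and_two_pow_sub_one_eq_mod x 24
  norm_num at h
  exact h

lemma pvStep_cast (u : Nat) : pvStep ((u : Nat) : Int) = ((sN u : Nat) : Int) := by
  unfold pvStep sN stA stB stC
  simp only [cast_shl, cast_shr, PySem.Int.bxor_natCast, band_mask_cast]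
  norm_num

lemma band1_cast (v : Nat) : PySem.Int.band ((v : Nat) : Int) 1 = ((v % 2 : Nat) : Int) := by
  rw [show (1 : Int) = ((1 : Nat) : Int) by norm_num, PySem.Int.band_natCast]
  congr 1
  have h := Nat.and_two_pow_sub_one_eq_mod v 1
  rw [show (2 : Nat) ^ 1 - 1 = 1 from rfl, show (2 : Nat) ^ 1 = 2 from rfl] at h
  exact h

lemma cast_half (v : Nat) : ((v : Nat) : Int) >>> (1 : Nat) = ((v / 2 : Nat) : Int) := by
  rw [cast_shr]
  congr 1

lemma pvApply_bridge_aux : ∀ (cols : List Nat) (r v : Nat),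
    ((cols.map (fun n : Nat => (n : Int))).foldl
        (fun (rv : Int × Int) c =>
          (if PySem.Int.band rv.2 1 ≠ 0 then PySem.Int.bxor rv.1 c else rv.1, rv.2 >>> (1 : Nat)))
        ((r : Int), (v : Int))).1
      = (((cols.foldl (fun (rv : Nat × Nat) c =>
          (if rv.2 % 2 = 1 then rv.1 ^^^ c else rv.1, rv.2 / 2)) (r, v)).1 : Nat) : Int) := by
  intro cols
  induction cols with
  | nil => intro r v; rfl
  | cons c cs ih =>
    intro r v
    simp only [List.map_cons, List.foldl_cons]
    rw [band1_cast, cast_half]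
    rcases Nat.mod_two_eq_zero_or_one v with h2 | h2 <;> rw [h2]
    · rw [if_neg (by norm_num), if_neg (by norm_num)]
      exact ih r (v / 2)
    · rw [if_pos (by norm_num), if_pos (by norm_num), PySem.Int.bxor_natCast]
      exact ih (r ^^^ c) (v / 2)

lemma pvApply_bridge (cols : List Nat) (v : Nat) :
    pvApply (cols.map (fun n : Nat => (n : Int))) ((v : Nat) : Int)
      = ((applyN cols v : Nat) : Int) := by
  unfold pvApply applyN
  have h := pvApply_bridge_aux cols 0 v
  simpa using h

lemma pvCompose_bridge (f g : List Nat) :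
    pvCompose (f.map (fun n : Nat => (n : Int))) (g.map (fun n : Nat => (n : Int)))
      = (composeN f g).map (fun n : Nat => (n : Int)) := by
  unfold pvCompose composeN
  rw [List.map_map, List.map_map]
  exact List.map_congr_left fun c _ => pvApply_bridge f c

lemma pvPowLoop_bridge : ∀ (e : Nat) (mat acc : List Nat),
    pvPowLoop (mat.map (fun n : Nat => (n : Int))) (acc.map (fun n : Nat => (n : Int))) e
      = (powLoopN mat acc e).map (fun n : Nat => (n : Int)) := by
  intro e
  induction e using Nat.strong_induction_on with
  | _ e ih =>
    intro mat acc
    match e with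
    | 0 => rw [pvPowLoop, powLoopN]
    | e' + 1 =>
      rw [pvPowLoop, powLoopN, pvCompose_bridge]
      by_cases hp : (e' + 1) % 2 = 1
      · rw [if_pos hp, if_pos hp, pvCompose_bridge, ih ((e' + 1) / 2) (by omega)]
      · rw [if_neg hp, if_neg hp, ih ((e' + 1) / 2) (by omega)]

-- ---- iterating the A round ----
lemma foldl_iter {α β : Type} (F : β → β) : ∀ (l : List α) (x : β),
    l.foldl (fun s _ => F s) x = F^[l.length] x := by
  intro l
  induction l with
  | nil => intro x; rfl
  | cons a l ih => intro x; simp [List.foldl_cons, ih, Function.iterate_succ_apply]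

lemma iter_round_cast (F : Int → Int)
    (hF : ∀ u : Nat, u < 2 ^ 24 → F ((u : Nat) : Int) = ((sN u : Nat) : Int)) :
    ∀ (n : Nat) (u : Nat), u < 2 ^ 24 → F^[n] ((u : Nat) : Int) = ((sN^[n] u : Nat) : Int) := by
  intro n
  induction n with
  | zero => intro u _; rfl
  | succ n ih =>
    intro u hu
    rw [Function.iterate_succ_apply, Function.iterate_succ_apply, hF u hu, ih _ (sN_lt u)]

lemma modM_loN (s : Int) : PySem.Int.mod s 16777216 = ((loN s : Nat) : Int) := by
  rw [PySem.Int.mod_eq_emod_of_pos (by norm_num)]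
  unfold loN
  omega

-- ===== VERDICT (by name: the statement is the Claim_ definition above) =====
theorem get_secret_number_sum_spec : Claim_equal_get_secret_number_sum := by
  intro xs cnt _
  unfold Spec_get_secret_number_sum
  by_cases hc : cnt ≤ 0
  · have hB : get_secret_number_sum_alt xs cnt = xs.sum := by
      unfold get_secret_number_sum_alt
      rw [if_pos hc]
    rw [hB]
    unfold get_secret_number_sum
    rw [PySem.List.pyRange_one_eq_nil hc]
    simp only [List.foldl_nil]
    rw [PySem.List.foldl_add (g := fun s : Int => s)]
    simp
  · have hB : get_secret_number_sum_alt xs cnt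
        = (xs.map (fun s => pvApply (pvPowLoop
            ((List.range 24).map (fun j : Nat => pvStep ((1 : Int) <<< j)))
            ((List.range 24).map (fun j : Nat => ((1 : Int) <<< j))) cnt.toNat)
            (PySem.Int.mod s 16777216))).sum := by
      unfold get_secret_number_sum_alt
      rw [if_neg hc]
    rw [hB]
    unfold get_secret_number_sum
    have hn : 1 ≤ cnt.toNat := by omega
    obtain ⟨m, hm⟩ : ∃ m, cnt.toNat = m + 1 := ⟨cnt.toNat - 1, by omega⟩
    -- the A-side round function
    set F : Int → Int := fun s =>
      (let s1 := mix_and_prune s (s * 64);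
       let s2 := mix_and_prune s1 (PySem.Int.floordiv s1 32);
       mix_and_prune s2 (s2 * 2048)) with hFdef
    have hF : ∀ u : Nat, u < 2 ^ 24 → F ((u : Nat) : Int) = ((sN u : Nat) : Int) := by
      intro u hu
      have h := pvRound_eq ((u : Nat) : Int)
      rw [loN_natCast u (by omega)] at h
      exact h
    have hlen : (PySem.List.pyRange 0 cnt 1).length = cnt.toNat := by
      rw [PySem.List.length_pyRange_one]
      omega
    have hper : ∀ s : Int,
        (PySem.List.pyRange 0 cnt 1).foldl (fun s _ => F s) s
          = ((sN^[cnt.toNat] (loN s) : Nat) : Int) := by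
      intro s
      rw [foldl_iter, hlen, hm, Function.iterate_succ_apply]
      have h1 : F s = ((sN (loN s) : Nat) : Int) := pvRound_eq s
      rw [h1, iter_round_cast F hF m _ (sN_lt _), ← Function.iterate_succ_apply]
    -- A as a sum over the list
    rw [PySem.List.foldl_add
      (g := fun s : Int => (PySem.List.pyRange 0 cnt 1).foldl (fun s _ => F s) s)]
    rw [zero_add]
    -- B-side matrices are casts of the Nat model
    have hmat : (List.range 24).map (fun j : Nat => pvStep ((1 : Int) <<< j))
        = (matOf sN).map (fun n : Nat => (n : Int)) := by
      unfold matOf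
      rw [List.map_map]
      refine List.map_congr_left ?_
      intro j _
      show pvStep ((1 : Int) <<< j) = ((sN (2 ^ j) : Nat) : Int)
      rw [show ((1 : Int) <<< j) = ((2 ^ j : Nat) : Int) by
        rw [show (1 : Int) = ((1 : Nat) : Int) from rfl, cast_shl]
        congr 1
        rw [Nat.shiftLeft_eq, one_mul]]
      exact pvStep_cast (2 ^ j)
    have hacc : (List.range 24).map (fun j : Nat => ((1 : Int) <<< j))
        = (matOf (fun v => v % 2 ^ 24)).map (fun n : Nat => (n : Int)) := by
      unfold matOf
      rw [List.map_map]
      refine List.map_congr_left ?_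
      intro j hj
      have hj24 : j < 24 := List.mem_range.mp hj
      show ((1 : Int) <<< j) = (((2 ^ j : Nat) % 2 ^ 24 : Nat) : Int)
      rw [show ((1 : Int) <<< j) = ((2 ^ j : Nat) : Int) by
        rw [show (1 : Int) = ((1 : Nat) : Int) from rfl, cast_shl]
        congr 1
        rw [Nat.shiftLeft_eq, one_mul]]
      congr 1
      rw [Nat.mod_eq_of_lt (Nat.pow_lt_pow_right (by norm_num) hj24)]
    rw [hmat, hacc, pvPowLoop_bridge, powLoopN_sem cnt.toNat sN _ lin_sN lin_id24]
    -- pointwise equality of the two per-element maps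
    refine congrArg List.sum (List.map_congr_left ?_)
    intro s _
    rw [hper s, modM_loN, pvApply_bridge]
    have hlin : Lin (fun v => sN^[cnt.toNat] (v % 2 ^ 24)) := by
      rw [hm]
      exact lin_comp (lin_iter lin_sN m) lin_id24
    rw [applyN_matOf hlin _ (by have := loN_lt s; omega)]
    show _ = ((sN^[cnt.toNat] (loN s % 2 ^ 24) : Nat) : Int)
    rw [Nat.mod_eq_of_lt (by have := loN_lt s; omega)]
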